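-- pv_equiv track=rewrite | github.com/heinricitorgau/research-claw-code | local_ai/rag/build_index.py | _split_plain
-- ===== SOURCE A (Python) =====
-- def _split_plain(text: str, max_lines: int = 40) -> list[tuple[str, str]]:
--     lines = text.splitlines()
--     chunks: list[tuple[str, str]] = []
--     for start in range(0, len(lines), max_lines):
--         part = "\n".join(lines[start : start + max_lines]).strip()
--         if part:
--             chunks.append(("", part))
--     return chunks
-- ===== SOURCE B (Python) =====
-- def _split_plain(text: str, max_lines: int = 40) -> list[tuple[str, str]]:
--     chunks: list[tuple[str, str]] = []
--     buf: list[str] = []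
--     for line in text.splitlines():
--         buf.append(line)
--         if len(buf) >= max_lines:
--             part = "\n".join(buf).strip()
--             if part:
--                 chunks.append(("", part))
--             buf = []
--     if buf:
--         part = "\n".join(buf).strip()
--         if part:
--             chunks.append(("", part))
--     return chunks
-- ===== Notes on version B (the rewrite author's own statement) =====
-- stated objective: alternative
-- what changed: Replaces A's index-strided slicing over range(0, len(lines), max_lines) with a single pass over the lines that accumulates a buffer and emits each block as it fills, flushing the trailing partial block after the loop. Pre_ excludes non-positive max_lines, where A either raises (0) or returns [] purely as an artefact of range's empty negative-step result.
-- outside the precondition, e.g. on _split_plain('a\nb', -1): A returns [], B returns [('', 'a'), ('', 'b')]; on _split_plain('hi', 0): A raises ValueError, B returns [('', 'hi')]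
import Mathlib
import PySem

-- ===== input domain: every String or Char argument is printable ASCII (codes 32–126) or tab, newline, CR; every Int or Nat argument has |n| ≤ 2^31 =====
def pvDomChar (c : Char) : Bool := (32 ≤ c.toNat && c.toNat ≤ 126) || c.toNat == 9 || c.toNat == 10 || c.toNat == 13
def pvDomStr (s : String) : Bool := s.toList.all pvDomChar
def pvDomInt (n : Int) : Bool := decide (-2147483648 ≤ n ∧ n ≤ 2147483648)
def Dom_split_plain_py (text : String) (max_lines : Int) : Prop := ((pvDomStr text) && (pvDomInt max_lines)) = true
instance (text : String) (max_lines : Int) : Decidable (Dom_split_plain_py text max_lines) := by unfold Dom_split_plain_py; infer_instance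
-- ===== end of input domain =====

-- B replaces A's index-strided slicing with a single buffered pass over the lines
-- (alternative decomposition, same cost); equivalence is proved for 0 < max_lines.
-- ===== PORT A =====
def split_plain_py (text : String) (max_lines : Int) : List (String × String) :=
  let lines := PySem.Str.splitlines text
  (PySem.List.pyRange 0 (PySem.List.len lines) max_lines).foldl
    (fun chunks start =>
      let part := PySem.Str.strip (PySem.Str.join "\n"
        (PySem.List.slice lines (some start) (some (start + max_lines))))
      if part ≠ "" then chunks ++ [("", part)] else chunks) []

-- ===== PORT B =====
def altFlush (buf : List String) (chunks : List (String × String)) : List (String × String) :=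
  let part := PySem.Str.strip (PySem.Str.join "\n" buf)
  if part ≠ "" then chunks ++ [("", part)] else chunks

def altGo (k : Int) (lines buf : List String) (chunks : List (String × String)) :
    List (String × String) :=
  match lines with
  | [] => if buf ≠ [] then altFlush buf chunks else chunks
  | line :: rest =>
    let buf' := buf ++ [line]
    if k ≤ (buf'.length : Int) then altGo k rest [] (altFlush buf' chunks)
    else altGo k rest buf' chunks

def split_plain_py_alt (text : String) (max_lines : Int) : List (String × String) :=
  altGo max_lines (PySem.Str.splitlines text) [] []

-- ===== PRECONDITION & SPEC =====
-- Pre_ excludes non-positive max_lines: at 0 A raises ValueError (range step must not be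
-- zero), and for negative values A returns [] purely as an artefact of range's empty
-- negative-step result, which B does not reproduce.
def Pre_split_plain_py (text : String) (max_lines : Int) : Prop := 0 < max_lines
instance (text : String) (max_lines : Int) : Decidable (Pre_split_plain_py text max_lines) := by
  unfold Pre_split_plain_py; infer_instance

def pvWitness_split_plain_py : String × Int := ("a\nb\nc", 2)

def Spec_split_plain_py (text : String) (max_lines : Int) (out : List (String × String)) : Prop :=
  out = split_plain_py_alt text max_lines
instance (text : String) (max_lines : Int) (out : List (String × String)) :
    Decidable (Spec_split_plain_py text max_lines out) := by
  unfold Spec_split_plain_py; infer_instance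

-- ===== CLAIM (what is proved, stated in full; the proofs are below) =====
def Claim_equal_split_plain_py : Prop := ∀ (text : String) (max_lines : Int),
  Dom_split_plain_py text max_lines → Pre_split_plain_py text max_lines →
  Spec_split_plain_py text max_lines (split_plain_py text max_lines)

-- ===== LEMMAS AND PROOFS =====

/-- The consecutive blocks of `kk + 1` lines of a line list, in order. -/
def blocks (kk : Nat) : List String → List (List String)
  | [] => []
  | x :: xs => (x :: xs.take kk) :: blocks kk (xs.drop kk)
termination_by l => l.length
decreasing_by simp

lemma blocks_nil (kk : Nat) : blocks kk [] = [] := by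
  rw [blocks]

lemma blocks_cons (kk : Nat) (x : String) (xs : List String) :
    blocks kk (x :: xs) = (x :: xs.take kk) :: blocks kk (xs.drop kk) := by
  rw [blocks]

lemma pyRange_zero_of_nonpos (b s : Int) (hb : b ≤ 0) (hs : 0 < s) :
    PySem.List.pyRange 0 b s = [] := by
  rw [PySem.List.pyRange_of_pos _ _ hs]
  have h : ¬ ((0:Int) < b) := by omega
  simp [h]

lemma pyRange_shift (k n : Int) (hk : 0 < k) :
    PySem.List.pyRange k n k = (PySem.List.pyRange 0 (n - k) k).map (k + ·) := by
  rw [PySem.List.pyRange_of_pos _ _ hk, PySem.List.pyRange_of_pos _ _ hk, List.map_map]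
  have hc : (if k < n then ((n - k + k - 1) / k).toNat else 0)
      = (if 0 < n - k then ((n - k - 0 + k - 1) / k).toNat else 0) := by
    by_cases h : k < n
    · rw [if_pos h, if_pos (by omega)]; ring_nf
    · have h2 : ¬((0:Int) < n - k) := by omega
      simp [h]
  rw [hc]
  refine List.map_congr_left ?_
  intro j _
  show k + k * (j : Int) = k + (0 + k * (j : Int))
  ring

lemma pyRange_cons (k n : Int) (hk : 0 < k) (hn : 0 < n) :
    PySem.List.pyRange 0 n k = 0 :: PySem.List.pyRange k n k := by
  rw [PySem.List.pyRange_of_pos _ _ hk, PySem.List.pyRange_of_pos _ _ hk]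
  have hc : (if 0 < n then ((n - 0 + k - 1) / k).toNat else 0)
      = (if k < n then ((n - k + k - 1) / k).toNat else 0) + 1 := by
    rw [if_pos hn]
    by_cases h : k < n
    · rw [if_pos h]
      have h1 : n - 0 + k - 1 = (n - k + k - 1) + k * 1 := by ring
      rw [h1, Int.add_mul_ediv_left _ _ (by omega)]
      have h0 : 0 ≤ (n - k + k - 1) / k := Int.ediv_nonneg (by omega) (by omega)
      omega
    · rw [if_neg h]
      have h1 : (1:Int) ≤ (n - 0 + k - 1) / k := by
        rw [Int.le_ediv_iff_mul_le hk]; omega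
      have h2 : (n - 0 + k - 1) / k < 2 := by
        rw [Int.ediv_lt_iff_lt_mul hk]; omega
      omega
  rw [hc, List.range_succ_eq_map, List.map_cons, List.map_map]
  congr 1
  · simp
  · refine List.map_congr_left ?_
    intro j _
    show (0:Int) + k * ((j + 1 : Nat) : Int) = k + k * (j : Int)
    push_cast
    ring

lemma aux_B (kk : Nat) : ∀ (l buf : List String) (chunks : List (String × String)),
    buf.length ≤ kk →
    altGo ((kk : Int) + 1) l buf chunks =
      (if l.length + buf.length ≤ kk then
        (if buf ++ l ≠ [] then altFlush (buf ++ l) chunks else chunks)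
      else
        altGo ((kk : Int) + 1) (l.drop (kk + 1 - buf.length)) []
          (altFlush (buf ++ l.take (kk + 1 - buf.length)) chunks)) := by
  intro l
  induction l with
  | nil =>
    intro buf chunks h
    rw [if_pos (by simpa using h)]
    simp [altGo]
  | cons x rest ih =>
    intro buf chunks h
    rw [altGo]
    by_cases hfull : buf.length = kk
    · rw [if_pos (by simp; omega)]
      rw [if_neg (by simp; omega)]
      have h1 : kk + 1 - buf.length = 1 := by omega
      rw [h1]
      rfl
    · rw [if_neg (by simp; omega)]
      rw [ih (buf ++ [x]) chunks (by simp; omega)]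
      have h4 : (buf ++ [x]).length = buf.length + 1 := by simp
      have h5 : (x :: rest).length = rest.length + 1 := by simp
      by_cases hsmall : rest.length + (buf ++ [x]).length ≤ kk
      · have hc2 : (x :: rest).length + buf.length ≤ kk := by omega
        rw [if_pos hsmall, if_pos hc2]
        rw [if_pos (by simp), if_pos (by simp)]
        simp
      · have hc2 : ¬((x :: rest).length + buf.length ≤ kk) := by omega
        rw [if_neg hsmall, if_neg hc2]
        have hd : kk + 1 - buf.length = (kk - buf.length) + 1 := by omega
        have he : kk + 1 - (buf ++ [x]).length = kk - buf.length := by omega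
        rw [hd, he, List.drop_succ_cons, List.take_succ_cons]
        simp

lemma B_blocks (kk : Nat) : ∀ (l : List String) (chunks : List (String × String)),
    altGo ((kk : Int) + 1) l [] chunks
      = (blocks kk l).foldl (fun c b => altFlush b c) chunks := by
  intro l
  induction hn : l.length using Nat.strong_induction_on generalizing l with
  | _ n ih =>
    intro chunks
    match l with
    | [] => simp [altGo, blocks_nil]
    | x :: xs =>
      rw [aux_B kk (x :: xs) [] chunks (by simp)]
      by_cases hsmall : (x :: xs).length + ([] : List String).length ≤ kk
      · rw [if_pos hsmall]
        have htake : xs.take kk = xs := List.take_of_length_le (by simp at hsmall; omega)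
        have hdrop : xs.drop kk = [] := List.drop_of_length_le (by simp at hsmall; omega)
        rw [blocks_cons, htake, hdrop, blocks_nil]
        simp
      · rw [if_neg hsmall]
        have hstep : (x :: xs).drop (kk + 1 - ([] : List String).length) = xs.drop kk := by simp
        have htk : ([] : List String) ++ (x :: xs).take (kk + 1 - ([] : List String).length)
            = x :: xs.take kk := by simp
        rw [hstep, htk]
        rw [ih (xs.drop kk).length (by subst hn; simp; try omega) (xs.drop kk) rfl]
        rw [blocks_cons]
        simp

set_option maxHeartbeats 1000000 in
lemma A_blocks (kk : Nat) : ∀ (l : List String) (chunks : List (String × String)),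
    (PySem.List.pyRange 0 (PySem.List.len l) ((kk : Int) + 1)).foldl
      (fun c s => altFlush (PySem.List.slice l (some s) (some (s + ((kk : Int) + 1)))) c) chunks
    = (blocks kk l).foldl (fun c b => altFlush b c) chunks := by
  intro l
  induction hn : l.length using Nat.strong_induction_on generalizing l with
  | _ n ih =>
    intro chunks
    match l with
    | [] =>
      rw [PySem.List.len_eq]
      rw [show ((([] : List String).length : Nat) : Int) = 0 by simp]
      rw [pyRange_zero_of_nonpos 0 ((kk : Int) + 1) le_rfl (by omega), blocks_nil]
      rfl
    | x :: xs =>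
      have hk : (0:Int) < (kk : Int) + 1 := by omega
      have hlen : PySem.List.len (x :: xs) = (((x :: xs).length : Nat) : Int) :=
        PySem.List.len_eq _
      rw [hlen, pyRange_cons _ _ hk (by simp; try omega), pyRange_shift _ _ hk,
        List.foldl_cons, List.foldl_map]
      have hslice0 : PySem.List.slice (x :: xs) (some 0) (some (0 + ((kk : Int) + 1)))
          = x :: xs.take kk := by
        rw [PySem.List.slice_toNat _ (le_refl 0) (by omega)]
        have h1 : ((0 : Int) + ((kk : Int) + 1)).toNat = kk + 1 := by omega
        have h2 : ((0 : Int)).toNat = 0 := rfl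
        rw [h1, h2]
        simp
      rw [hslice0]
      have hmem : ∀ (acc : List (String × String)),
          ∀ s ∈ PySem.List.pyRange 0 ((((x :: xs).length : Nat) : Int) - ((kk : Int) + 1))
              ((kk : Int) + 1),
          altFlush (PySem.List.slice (x :: xs) (some (((kk : Int) + 1) + s))
            (some ((((kk : Int) + 1) + s) + ((kk : Int) + 1)))) acc
          = altFlush (PySem.List.slice (xs.drop kk) (some s) (some (s + ((kk : Int) + 1)))) acc := by
        intro acc s hs
        have hs0 : 0 ≤ s := ((PySem.List.mem_pyRange_iff_of_pos hk s).mp hs).1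
        obtain ⟨st, rfl⟩ : ∃ st : Nat, s = (st : Int) := ⟨s.toNat, by omega⟩
        congr 1
        rw [PySem.List.slice_toNat _ (by omega) (by omega),
          PySem.List.slice_toNat _ (by omega) (by omega)]
        have e1 : (((kk : Int) + 1) + (st : Int)).toNat = (kk + 1) + st := by omega
        have e2 : ((((kk : Int) + 1) + (st : Int)) + ((kk : Int) + 1)).toNat
            = ((kk + 1) + st) + (kk + 1) := by omega
        have e3 : ((st : Int)).toNat = st := by omega
        have e4 : ((st : Int) + ((kk : Int) + 1)).toNat = st + (kk + 1) := by omega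
        rw [e1, e2, e3, e4]
        have hd : List.drop ((kk + 1) + st) (x :: xs) = List.drop st (List.drop kk xs) := by
          rw [List.drop_drop]
          have h5 : (kk + 1) + st = (kk + st) + 1 := by omega
          rw [h5, List.drop_succ_cons]
        rw [hd]
        congr 1
        omega
      have step1 := PySem.List.foldl_congr_mem
        (PySem.List.pyRange 0 ((((x :: xs).length : Nat) : Int) - ((kk : Int) + 1)) ((kk : Int) + 1))
        (fun c s => altFlush (PySem.List.slice (x :: xs) (some (((kk : Int) + 1) + s))
          (some ((((kk : Int) + 1) + s) + ((kk : Int) + 1)))) c)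
        (fun c s => altFlush (PySem.List.slice (xs.drop kk) (some s) (some (s + ((kk : Int) + 1)))) c)
        (altFlush (x :: xs.take kk) chunks)
        hmem
      refine Eq.trans step1 ?_
      have hbnd : PySem.List.pyRange 0 ((((x :: xs).length : Nat) : Int) - ((kk : Int) + 1))
            ((kk : Int) + 1)
          = PySem.List.pyRange 0 (PySem.List.len (xs.drop kk)) ((kk : Int) + 1) := by
        have hlen2 : PySem.List.len (xs.drop kk) = ((xs.length - kk : Nat) : Int) := by
          rw [PySem.List.len_eq, List.length_drop]
        by_cases hge : kk ≤ xs.length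
        · rw [hlen2]
          congr 1
          simp only [List.length_cons]
          omega
        · rw [pyRange_zero_of_nonpos _ _ (by push_cast [List.length_cons]; omega) hk, hlen2,
            pyRange_zero_of_nonpos _ _ (by omega) hk]
      rw [hbnd, ih (xs.drop kk).length (by subst hn; simp; try omega) (xs.drop kk) rfl]
      rw [blocks_cons]
      rfl

-- ===== VERDICT (by name: the statement is the Claim_ definition above) =====
theorem split_plain_py_spec : Claim_equal_split_plain_py := by
  intro text max_lines _ hpre
  unfold Spec_split_plain_py split_plain_py split_plain_py_alt
  have hpre' : 0 < max_lines := hpre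
  obtain ⟨kk, rfl⟩ : ∃ kk : Nat, max_lines = (kk : Int) + 1 :=
    ⟨(max_lines - 1).toNat, by omega⟩
  rw [B_blocks kk (PySem.Str.splitlines text) []]
  rw [← A_blocks kk (PySem.Str.splitlines text) []]
  rfl
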